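-- pv_equiv track=rewrite | github.com/Fricko03/Teoria_de_la_info | UNIDAD_3/Util.py | es_UD
-- ===== SOURCE A (Python) =====
-- def es_UD(C1):
--     lista_de_S=[]
--     C1=set(C1)
--     s1=set(C1)
--     s_aux=set()
--     lista_de_S.append(s1)
--     for i in s1:
--         for j in C1:
--             if (j!=i):
--                 if (j.startswith(i)):
--                     s_aux.add(j[len(i):])
--                 elif (i.startswith(j)):
--                     s_aux.add(i[len(j):])
--     while( not C1.intersection(s_aux) and  s_aux not in lista_de_S):
--         lista_de_S.append(s_aux.copy())
--         s_aux.clear()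
--         for i in lista_de_S[-1]:
--             for j in s1:
--                 if (j!=i):
--                     if (j.startswith(i)):
--                         s_aux.add(j[len(i):])
--                     elif (i.startswith(j)):
--                         s_aux.add(i[len(j):])
--
--     return s_aux in lista_de_S
-- ===== SOURCE B (Python) =====
-- def es_UD(C1):
--     code = set(C1)
--
--     # trie of the codeword set: nested dicts; the '' key marks the end of a codeword
--     root = {}
--     for w in code:
--         node = root
--         for ch in w:
--             node = node.setdefault(ch, {})
--         node[''] = True
--
--     def collect(node, acc, out):
--         # tails of every codeword strictly below this node (acc = path walked so far)
--         for k, v in node.items():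
--             if k == '':
--                 if acc:
--                     out.add(acc)
--             else:
--                 collect(v, acc + k, out)
--
--     def dangles_into(x, out):
--         # walk x through the trie, emitting every dangling suffix of a pair (x, codeword)
--         node = root
--         for pos, ch in enumerate(x):
--             if '' in node:
--                 out.add(x[pos:])          # codeword x[:pos] is a proper prefix of x
--             if ch not in node:
--                 return
--             node = node[ch]
--         collect(node, '', out)            # codewords properly extending x
--
--     def nxt(S):
--         out = set()
--         for x in S:
--             dangles_into(x, out)
--         return out
--
--     history = [code]
--     S = nxt(code)
--     while True:
--         if not code.isdisjoint(S):
--             return S in history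
--         if S in history:
--             return True
--         history.append(S)
--         S = nxt(S)
-- ===== Notes on version B (the rewrite author's own statement) =====
-- stated objective: faster
-- what changed: B replaces A's all-pairs startswith scans by a trie (prefix tree) built once from the codeword set: each string is walked through the trie, emitting a dangling suffix at every complete-codeword node passed along the walk and enumerating the subtree of codewords that extend the string; the driver is an early-return loop over a history list instead of A's compound while-condition over parallel state.
import Mathlib
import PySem

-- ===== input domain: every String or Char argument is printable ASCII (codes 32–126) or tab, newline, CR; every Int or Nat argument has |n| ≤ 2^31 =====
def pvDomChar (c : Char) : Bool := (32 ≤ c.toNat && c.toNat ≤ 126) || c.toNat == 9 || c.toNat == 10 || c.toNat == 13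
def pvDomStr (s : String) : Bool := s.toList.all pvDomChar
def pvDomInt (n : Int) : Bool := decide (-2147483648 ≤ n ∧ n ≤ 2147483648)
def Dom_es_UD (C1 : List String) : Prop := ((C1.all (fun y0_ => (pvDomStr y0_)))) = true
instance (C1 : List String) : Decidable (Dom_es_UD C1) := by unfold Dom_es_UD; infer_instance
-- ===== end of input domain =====

-- B replaces A's codeword-vs-codeword startswith scans by a trie (prefix tree) of the codeword
-- set: each string is walked through the trie once, emitting a tail at every complete-codeword
-- node passed and enumerating the subtree of codewords extending it (objective: faster, as
-- measured; both Pythons terminate on every input, the ports totalize the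
-- identical Python while-loop with the same unreachable-in-practice fuel bound).

-- ===== PORT A =====
-- shared totalization fuel for the Python 'while' loop of both versions: the loop appends a
-- previously-unseen subset of the (≤ Σ|w|+|C1|)-element suffix universe each iteration, so it
-- performs at most 2^(Σ|w|+|C1|)+1 iterations; the fuel-0 branch is never reached in practice.
def pvFuel (C1 : List String) : Nat := 2 ^ ((C1.map (fun w => w.toList.length)).sum + C1.length) + 2

def esUD_pair (acc : PySem.Set String) (i j : String) : PySem.Set String :=
  if j != i then
    if PySem.Str.startswith j i then PySem.Set.add acc (PySem.Str.slice j (some (PySem.Str.len i)) none)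
    else if PySem.Str.startswith i j then PySem.Set.add acc (PySem.Str.slice i (some (PySem.Str.len j)) none)
    else acc
  else acc

-- the double 'for i in …: for j in …' filling s_aux (iteration over a set: the result is a Set,
-- so it does not depend on the unmodelled hash order)
def esUD_fill (src cod : PySem.Set String) : PySem.Set String :=
  src.foldl (fun acc i => cod.foldl (fun acc j => esUD_pair acc i j) acc) PySem.Set.empty

def esUD_loop (C1s s1 : PySem.Set String) : Nat → List (PySem.Set String) → PySem.Set String → Bool
  | 0, lista, s_aux => lista.any (fun t => PySem.Set.equal s_aux t)
  | fuel+1, lista, s_aux =>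
    if (PySem.Set.inter C1s s_aux).isEmpty && !(lista.any (fun t => PySem.Set.equal s_aux t)) then
      esUD_loop C1s s1 fuel (lista ++ [s_aux]) (esUD_fill s_aux s1)
    else lista.any (fun t => PySem.Set.equal s_aux t)

def es_UD (C1 : List String) : Bool :=
  let C1s := PySem.Set.ofList C1
  let s1 := C1s
  esUD_loop C1s s1 (pvFuel C1) [s1] (esUD_fill s1 C1s)

-- ===== PORT B =====
-- the trie of Source B's nested dicts: a node's end-of-codeword mark ('' key) and its children
-- (a mutual pair instead of a nested 'List (Char × Trie)', which the kernel cannot re-check)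
mutual
inductive Trie where
  | node : Bool → TrieKids → Trie
inductive TrieKids where
  | nil : TrieKids
  | cons : Char → Trie → TrieKids → TrieKids
end

-- 'node = node.setdefault(ch, {})' walk of one codeword, then 'node[""] = True'
mutual
def trieInsert (t : Trie) (cs : List Char) : Trie :=
  match t, cs with
  | Trie.node _ k, [] => Trie.node true k
  | Trie.node b k, c :: cs' => Trie.node b (kidsInsert k c cs')
  termination_by (cs.length, 0)
def kidsInsert (k : TrieKids) (c : Char) (cs : List Char) : TrieKids :=
  match k with
  | TrieKids.nil => TrieKids.cons c (trieInsert (Trie.node false TrieKids.nil) cs) TrieKids.nil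
  | TrieKids.cons c' t rest =>
      if c' = c then TrieKids.cons c' (trieInsert t cs) rest
      else TrieKids.cons c' t (kidsInsert rest c cs)
  termination_by (cs.length, sizeOf k + 1)
end

def trieOf (code : PySem.Set String) : Trie :=
  code.foldl (fun t w => trieInsert t w.toList) (Trie.node false TrieKids.nil)

-- 'collect(node, acc, out)': tails of every codeword strictly below this node
mutual
def collect (t : Trie) (acc : List Char) (out : PySem.Set String) : PySem.Set String :=
  match t with
  | Trie.node b kids =>
      collectKids kids acc (if b && !acc.isEmpty then PySem.Set.add out (String.ofList acc) else out)
def collectKids (k : TrieKids) (acc : List Char) (out : PySem.Set String) : PySem.Set String :=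
  match k with
  | TrieKids.nil => out
  | TrieKids.cons c t rest => collectKids rest acc (collect t (acc ++ [c]) out)
end

def kidsFind (k : TrieKids) (c : Char) : Option Trie :=
  match k with
  | TrieKids.nil => none
  | TrieKids.cons c' t rest => if c' = c then some t else kidsFind rest c

-- 'dangles_into(x, out)': walk x through the trie
def dangWalk (t : Trie) (rem : List Char) (out : PySem.Set String) : PySem.Set String :=
  match t, rem with
  | t, [] => collect t [] out
  | Trie.node b kids, c :: rest =>
      let out1 := if b then PySem.Set.add out (String.ofList (c :: rest)) else out
      match kidsFind kids c with
      | some t' => dangWalk t' rest out1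
      | none => out1

-- 'nxt(S)' (iteration over a set building a set: order-independent)
def esUDalt_next (root : Trie) (S : PySem.Set String) : PySem.Set String :=
  S.foldl (fun out x => dangWalk root x.toList out) PySem.Set.empty

-- the Python 'while True' with early returns; history is a list of sets, 'S in history'
-- compares by set equality (Set.equal), as Python's == on sets does
def esUDalt_loop (code : PySem.Set String) (root : Trie) : Nat → List (PySem.Set String) → PySem.Set String → Bool
  | 0, history, S => history.any (fun t => PySem.Set.equal S t)
  | fuel+1, history, S =>
    if !(PySem.Set.isdisjoint code S) then history.any (fun t => PySem.Set.equal S t)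
    else if history.any (fun t => PySem.Set.equal S t) then true
    else esUDalt_loop code root fuel (history ++ [S]) (esUDalt_next root S)

def es_UD_alt (C1 : List String) : Bool :=
  let code := PySem.Set.ofList C1
  let root := trieOf code
  esUDalt_loop code root (pvFuel C1) [code] (esUDalt_next root code)

-- ===== PRECONDITION & SPEC =====
def Spec_es_UD (C1 : List String) (out : Bool) : Prop := out = es_UD_alt C1
instance (C1 : List String) (out : Bool) : Decidable (Spec_es_UD C1 out) := by unfold Spec_es_UD; infer_instance

-- ===== CLAIM (what is proved, stated in full; the proofs are below) =====
def Claim_equal_es_UD : Prop := ∀ (C1 : List String), Dom_es_UD C1 → Spec_es_UD C1 (es_UD C1)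

-- ===== LEMMAS AND PROOFS =====

-- the dangling suffixes contributed by one source string i against the codeword set 'cod'
def Phi (cod : List String) (i x : String) : Prop :=
  ∃ c ∈ cod, c ≠ i ∧
    ((i.toList <+: c.toList ∧ x = PySem.Str.slice c (some (PySem.Str.len i)) none) ∨
     (c.toList <+: i.toList ∧ x = PySem.Str.slice i (some (PySem.Str.len c)) none))

-- generic membership lemma for 'for b in l: conditionally add things to out'
theorem mem_foldl_emit {β : Type} (E : β → String → Prop)
    (g : PySem.Set String → β → PySem.Set String)
    (H : ∀ acc b x, x ∈ g acc b ↔ x ∈ acc ∨ E b x) :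
    ∀ (l : List β) (acc : PySem.Set String) (x : String),
      x ∈ l.foldl g acc ↔ x ∈ acc ∨ ∃ b ∈ l, E b x := by
  intro l
  induction l with
  | nil => simp
  | cons b l ih =>
    intro acc x
    simp only [List.foldl_cons, ih, H, List.mem_cons]
    constructor
    · rintro (( h | h) | ⟨b', hb', h⟩)
      · exact Or.inl h
      · exact Or.inr ⟨b, Or.inl rfl, h⟩
      · exact Or.inr ⟨b', Or.inr hb', h⟩
    · rintro (h | ⟨b', (rfl | hb'), h⟩)
      · exact Or.inl (Or.inl h)
      · exact Or.inl (Or.inr h)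
      · exact Or.inr ⟨b', hb', h⟩

theorem prefix_antisymm_str {i j : String}
    (h1 : i.toList <+: j.toList) (h2 : j.toList <+: i.toList) : i = j := by
  apply String.toList_inj.mp
  exact h1.eq_of_length (Nat.le_antisymm h1.length_le h2.length_le)

theorem mem_esUD_pair (acc : PySem.Set String) (i j x : String) :
    x ∈ esUD_pair acc i j ↔ x ∈ acc ∨
      (j ≠ i ∧ ((i.toList <+: j.toList ∧ x = PySem.Str.slice j (some (PySem.Str.len i)) none) ∨
                (j.toList <+: i.toList ∧ x = PySem.Str.slice i (some (PySem.Str.len j)) none))) := by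
  unfold esUD_pair
  by_cases hne : j = i
  · subst hne; simp
  · simp only [bne_iff_ne, ne_eq, hne, not_false_eq_true, if_true]
    by_cases h1 : i.toList <+: j.toList
    · have h1' : PySem.Chars.startswith j.toList i.toList = true :=
        (PySem.Chars.startswith_iff _ _).mpr h1
      have h2 : ¬ j.toList <+: i.toList := fun h2 => hne (prefix_antisymm_str h2 h1)
      simp [h1', PySem.Set.mem_add, h1, h2]
    · have h1' : PySem.Chars.startswith j.toList i.toList = false :=
        Bool.not_eq_true _ ▸ (fun h => h1 ((PySem.Chars.startswith_iff _ _).mp h))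
      by_cases h2 : j.toList <+: i.toList
      · have h2' : PySem.Chars.startswith i.toList j.toList = true :=
          (PySem.Chars.startswith_iff _ _).mpr h2
        simp [h1', h2', PySem.Set.mem_add, h1, h2]
      · have h2' : PySem.Chars.startswith i.toList j.toList = false :=
          Bool.not_eq_true _ ▸ (fun h => h2 ((PySem.Chars.startswith_iff _ _).mp h))
        simp [h1', h2', h1, h2]

theorem mem_esUD_fill (src cod : PySem.Set String) (x : String) :
    x ∈ esUD_fill src cod ↔ ∃ i ∈ src, Phi cod i x := by
  unfold esUD_fill
  rw [mem_foldl_emit (fun i x => Phi cod i x) _ ?_ src PySem.Set.empty x]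
  · simp [PySem.Set.empty]
  · intro acc i y
    rw [mem_foldl_emit (fun j y => j ≠ i ∧
          ((i.toList <+: j.toList ∧ y = PySem.Str.slice j (some (PySem.Str.len i)) none) ∨
           (j.toList <+: i.toList ∧ y = PySem.Str.slice i (some (PySem.Str.len j)) none)))
        _ (fun acc j y => mem_esUD_pair acc i j y) cod acc y]
    rfl

theorem mem_add_if (out : PySem.Set String) (p : Bool) (v x : String) :
    x ∈ (if p then PySem.Set.add out v else out) ↔ x ∈ out ∨ (p = true ∧ x = v) := by
  cases p <;> simp [PySem.Set.mem_add]

-- ===== trie correctness =====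

def kidsEntries : TrieKids → List (Char × Trie)
  | TrieKids.nil => []
  | TrieKids.cons c t rest => (c, t) :: kidsEntries rest

-- 'w is a codeword stored in the trie' (any-entry semantics)
def trieHas : List Char → Trie → Prop
  | [], Trie.node b _ => b = true
  | c :: cs, Trie.node _ k => ∃ p ∈ kidsEntries k, p.1 = c ∧ trieHas cs p.2

theorem trieHas_nil (b : Bool) (k : TrieKids) : trieHas [] (Trie.node b k) ↔ b = true := by
  simp only [trieHas]

theorem trieHas_cons (c : Char) (cs : List Char) (b : Bool) (k : TrieKids) :
    trieHas (c :: cs) (Trie.node b k) ↔ ∃ p ∈ kidsEntries k, p.1 = c ∧ trieHas cs p.2 := by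
  simp only [trieHas]

theorem trieHas_empty (v : List Char) : ¬ trieHas v (Trie.node false TrieKids.nil) := by
  cases v <;> simp [trieHas, kidsEntries]

theorem entry_ex_iff (E : List (Char × Trie)) (c' : Char) (P : Trie → Prop) :
    (∃ p ∈ E, p.1 = c' ∧ P p.2) ↔ ∃ t, (c', t) ∈ E ∧ P t := by
  constructor
  · rintro ⟨⟨pc, pt⟩, hp, rfl, h⟩; exact ⟨pt, hp, h⟩
  · rintro ⟨t, ht, h⟩; exact ⟨(c', t), ht, rfl, h⟩

theorem kidsEntries_insert_spec (c c' : Char) (cs cs' : List Char)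
    (IH : ∀ (t : Trie) (v : List Char), trieHas v (trieInsert t cs) ↔ v = cs ∨ trieHas v t) :
    ∀ (k : TrieKids),
      (∃ t, (c', t) ∈ kidsEntries (kidsInsert k c cs) ∧ trieHas cs' t) ↔
        ((c' = c ∧ cs' = cs) ∨ ∃ t, (c', t) ∈ kidsEntries k ∧ trieHas cs' t)
  | TrieKids.nil => by
      simp only [kidsInsert, kidsEntries, List.mem_singleton, List.not_mem_nil, false_and,
        exists_false, or_false, Prod.mk.injEq]
      constructor
      · rintro ⟨t, ⟨hc, rfl⟩, hh⟩
        rcases (IH _ cs').mp hh with hh | hh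
        · exact ⟨hc, hh⟩
        · exact absurd hh (trieHas_empty cs')
      · rintro ⟨hc, hcs⟩
        refine ⟨trieInsert (Trie.node false TrieKids.nil) cs, ⟨hc, rfl⟩, ?_⟩
        exact (IH _ cs').mpr (Or.inl hcs)
  | TrieKids.cons c0 t0 rest => by
      by_cases h : c0 = c
      · simp only [kidsInsert, if_pos h, kidsEntries, List.mem_cons, Prod.mk.injEq]
        constructor
        · rintro ⟨t, hmem, hh⟩
          rcases hmem with ⟨hc, ht⟩ | hmem
          · rcases (IH t0 cs').mp (ht ▸ hh) with hh2 | hh2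
            · exact Or.inl ⟨hc.trans h, hh2⟩
            · exact Or.inr ⟨t0, Or.inl ⟨hc, rfl⟩, hh2⟩
          · exact Or.inr ⟨t, Or.inr hmem, hh⟩
        · rintro (⟨hc, hcs⟩ | ⟨t, hmem, hh⟩)
          · exact ⟨trieInsert t0 cs, Or.inl ⟨hc.trans h.symm, rfl⟩, (IH t0 _).mpr (Or.inl hcs)⟩
          · rcases hmem with ⟨hc, ht⟩ | hmem
            · exact ⟨trieInsert t0 cs, Or.inl ⟨hc, rfl⟩, (IH t0 _).mpr (Or.inr (ht ▸ hh))⟩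
            · exact ⟨t, Or.inr hmem, hh⟩
      · have ihr := kidsEntries_insert_spec c c' cs cs' IH rest
        simp only [kidsInsert, if_neg h, kidsEntries, List.mem_cons, Prod.mk.injEq]
        constructor
        · rintro ⟨t, hmem, hh⟩
          rcases hmem with ⟨hc, ht⟩ | hmem
          · exact Or.inr ⟨t0, Or.inl ⟨hc, rfl⟩, ht ▸ hh⟩
          · rcases ihr.mp ⟨t, hmem, hh⟩ with h3 | ⟨q, hq, hh2⟩
            · exact Or.inl h3
            · exact Or.inr ⟨q, Or.inr hq, hh2⟩
        · rintro (h3 | ⟨t, hmem, hh⟩)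
          · obtain ⟨q, hq, hh2⟩ := ihr.mpr (Or.inl h3)
            exact ⟨q, Or.inr hq, hh2⟩
          · rcases hmem with ⟨hc, ht⟩ | hmem
            · exact ⟨t, Or.inl ⟨hc, ht⟩, hh⟩
            · obtain ⟨q, hq, hh2⟩ := ihr.mpr (Or.inr ⟨t, hmem, hh⟩)
              exact ⟨q, Or.inr hq, hh2⟩

theorem trieHas_insert : ∀ (w : List Char) (t : Trie) (v : List Char),
    trieHas v (trieInsert t w) ↔ v = w ∨ trieHas v t := by
  intro w
  induction w with
  | nil =>
    rintro ⟨b, k⟩ v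
    cases v with
    | nil => simp [trieInsert, trieHas]
    | cons c' cs' => simp [trieInsert, trieHas]
  | cons c cs ih =>
    rintro ⟨b, k⟩ v
    cases v with
    | nil => simp [trieInsert, trieHas]
    | cons c' cs' =>
      have lhs : trieHas (c' :: cs') (Trie.node b (kidsInsert k c cs)) ↔
          ∃ t, (c', t) ∈ kidsEntries (kidsInsert k c cs) ∧ trieHas cs' t := by
        simp only [trieHas]; exact entry_ex_iff _ _ _
      have rhs : trieHas (c' :: cs') (Trie.node b k) ↔
          ∃ t, (c', t) ∈ kidsEntries k ∧ trieHas cs' t := by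
        simp only [trieHas]; exact entry_ex_iff _ _ _
      simp only [trieInsert]
      rw [lhs, rhs, kidsEntries_insert_spec c c' cs cs' (fun t v => ih t v) k]
      simp only [List.cons.injEq]

theorem trieHas_foldl_insert (w : List Char) :
    ∀ (l : List String) (t : Trie),
      trieHas w (l.foldl (fun t s => trieInsert t s.toList) t) ↔
        (∃ s ∈ l, s.toList = w) ∨ trieHas w t := by
  intro l
  induction l with
  | nil => intro t; simp
  | cons s l ih =>
    intro t
    simp only [List.foldl_cons, ih, trieHas_insert, List.mem_cons]
    constructor
    · rintro (⟨s', hs', hw⟩ | (h | h))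
      · exact Or.inl ⟨s', Or.inr hs', hw⟩
      · exact Or.inl ⟨s, Or.inl rfl, h.symm⟩
      · exact Or.inr h
    · rintro (⟨s', (rfl | hs), hw⟩ | h)
      · exact Or.inr (Or.inl hw.symm)
      · exact Or.inl ⟨s', hs, hw⟩
      · exact Or.inr (Or.inr h)

theorem trieHas_trieOf (code : List String) (w : List Char) :
    trieHas w (trieOf code) ↔ ∃ s ∈ code, s.toList = w := by
  unfold trieOf
  rw [trieHas_foldl_insert]
  simp [trieHas_empty w]

-- well-formedness: children chars distinct at every node (Python dict keys)
def kidsChars (k : TrieKids) : List Char := (kidsEntries k).map Prod.fst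

mutual
def trieWF : Trie → Prop
  | Trie.node _ k => (kidsChars k).Nodup ∧ kidsWF k
def kidsWF : TrieKids → Prop
  | TrieKids.nil => True
  | TrieKids.cons _ t rest => trieWF t ∧ kidsWF rest
end

theorem trieWF_empty : trieWF (Trie.node false TrieKids.nil) := by
  simp [trieWF, kidsWF, kidsChars, kidsEntries]

theorem kidsChars_kidsInsert (c : Char) (cs : List Char) :
    ∀ (k : TrieKids), kidsChars (kidsInsert k c cs) =
      if c ∈ kidsChars k then kidsChars k else kidsChars k ++ [c]
  | TrieKids.nil => by simp [kidsInsert, kidsChars, kidsEntries]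
  | TrieKids.cons c0 t0 rest => by
      by_cases h : c0 = c
      · subst h
        simp [kidsInsert, kidsChars, kidsEntries]
      · have ih := kidsChars_kidsInsert c cs rest
        have hne : c ≠ c0 := fun e => h e.symm
        simp only [kidsInsert, if_neg h, kidsChars, kidsEntries, List.map_cons] at ih ⊢
        rw [ih]
        by_cases hm : c ∈ (kidsEntries rest).map Prod.fst
        · simp [hm, hne]
        · simp [hm, hne]

theorem kidsWF_kidsInsert (c : Char) (cs : List Char)
    (IH : ∀ t, trieWF t → trieWF (trieInsert t cs)) :
    ∀ (k : TrieKids), kidsWF k → kidsWF (kidsInsert k c cs)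
  | TrieKids.nil => fun _ => by
      simp only [kidsInsert, kidsWF]
      exact ⟨IH _ trieWF_empty, trivial⟩
  | TrieKids.cons c0 t0 rest => fun hk => by
      obtain ⟨ht0, hrest⟩ : trieWF t0 ∧ kidsWF rest := by simpa [kidsWF] using hk
      by_cases h : c0 = c
      · simp only [kidsInsert, if_pos h, kidsWF]
        exact ⟨IH t0 ht0, hrest⟩
      · simp only [kidsInsert, if_neg h, kidsWF]
        exact ⟨ht0, kidsWF_kidsInsert c cs IH rest hrest⟩

theorem trieWF_insert : ∀ (w : List Char) (t : Trie), trieWF t → trieWF (trieInsert t w) := by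
  intro w
  induction w with
  | nil =>
    rintro ⟨b, k⟩ hwf
    simpa [trieInsert, trieWF] using (by simpa [trieWF] using hwf : (kidsChars k).Nodup ∧ kidsWF k)
  | cons c cs ih =>
    rintro ⟨b, k⟩ hwf
    obtain ⟨hnd, hkw⟩ : (kidsChars k).Nodup ∧ kidsWF k := by simpa [trieWF] using hwf
    simp only [trieInsert, trieWF]
    constructor
    · rw [kidsChars_kidsInsert]
      split_ifs with hm
      · exact hnd
      · rw [List.nodup_append]
        refine ⟨hnd, List.nodup_singleton c, ?_⟩
        intro a ha b hb
        rw [List.mem_singleton] at hb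
        subst hb
        exact fun e => hm (e ▸ ha)
    · exact kidsWF_kidsInsert c cs ih k hkw

theorem trieWF_trieOf (code : List String) : trieWF (trieOf code) := by
  unfold trieOf
  have : ∀ (l : List String) (t : Trie), trieWF t →
      trieWF (l.foldl (fun t s => trieInsert t s.toList) t) := by
    intro l
    induction l with
    | nil => intro t h; exact h
    | cons s l ih => intro t h; exact ih _ (trieWF_insert s.toList t h)
  exact this code _ trieWF_empty

theorem kidsWF_entry (c : Char) (t : Trie) :
    ∀ (k : TrieKids), kidsWF k → (c, t) ∈ kidsEntries k → trieWF t
  | TrieKids.nil => fun _ hm => by simp [kidsEntries] at hm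
  | TrieKids.cons c0 t0 rest => fun hk hm => by
      obtain ⟨ht0, hrest⟩ : trieWF t0 ∧ kidsWF rest := by simpa [kidsWF] using hk
      simp only [kidsEntries, List.mem_cons, Prod.mk.injEq] at hm
      rcases hm with ⟨hc, ht⟩ | hm
      · exact ht.symm ▸ ht0
      · exact kidsWF_entry c t rest hrest hm

theorem kidsFind_iff_entry (c : Char) (t : Trie) :
    ∀ (k : TrieKids), (kidsChars k).Nodup → (kidsFind k c = some t ↔ (c, t) ∈ kidsEntries k)
  | TrieKids.nil => fun _ => by simp [kidsFind, kidsEntries]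
  | TrieKids.cons c0 t0 rest => fun hnd => by
      obtain ⟨hc0, hnd'⟩ : c0 ∉ (kidsEntries rest).map Prod.fst ∧ (kidsChars rest).Nodup := by
        simpa [kidsChars, kidsEntries] using hnd
      by_cases h : c0 = c
      · simp only [kidsFind, if_pos h, kidsEntries, List.mem_cons, Prod.mk.injEq]
        constructor
        · intro he
          exact Or.inl ⟨h.symm, (Option.some.inj he).symm⟩
        · rintro (⟨-, ht⟩ | hm)
          · rw [ht]
          · exact absurd (h.symm ▸ (List.mem_map_of_mem (f := Prod.fst) hm : c ∈ _)) hc0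
      · simp only [kidsFind, if_neg h, kidsEntries, List.mem_cons, Prod.mk.injEq]
        rw [kidsFind_iff_entry c t rest hnd']
        constructor
        · exact fun hm => Or.inr hm
        · rintro (⟨hc, -⟩ | hm)
          · exact absurd hc.symm h
          · exact hm

mutual
theorem mem_collect : ∀ (t : Trie) (acc : List Char) (out : PySem.Set String) (y : String),
    y ∈ collect t acc out ↔ y ∈ out ∨
      ∃ w, trieHas w t ∧ acc ++ w ≠ [] ∧ y = String.ofList (acc ++ w)
  | Trie.node b kids, acc, out, y => by
      simp only [collect]
      rw [mem_collectKids kids acc _ y, mem_add_if]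
      constructor
      · rintro ((h | ⟨hb, hy⟩) | ⟨c, t', w, hmem, hw, hy⟩)
        · exact Or.inl h
        · obtain ⟨hb', hacc⟩ : b = true ∧ (!acc.isEmpty) = true := by simpa using hb
          have hacc' : acc ≠ [] := by simpa using hacc
          exact Or.inr ⟨[], (trieHas_nil b kids).mpr hb', by simpa using hacc', by simpa using hy⟩
        · exact Or.inr ⟨c :: w, (trieHas_cons _ _ _ _).mpr ((entry_ex_iff _ _ _).mpr ⟨t', hmem, hw⟩),
            by simp, hy⟩
      · rintro (h | ⟨w, hw, hne, hy⟩)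
        · exact Or.inl (Or.inl h)
        · cases w with
          | nil =>
            have hb : b = true := (trieHas_nil b kids).mp hw
            have hacc : acc ≠ [] := by simpa using hne
            refine Or.inl (Or.inr ⟨?_, by simpa using hy⟩)
            cases acc with
            | nil => exact absurd rfl hacc
            | cons a l => simp [hb]
          | cons c w' =>
            obtain ⟨t', hmem, hw'⟩ := (entry_ex_iff _ _ _).mp ((trieHas_cons _ _ _ _).mp hw)
            exact Or.inr ⟨c, t', w', hmem, hw', hy⟩
theorem mem_collectKids : ∀ (k : TrieKids) (acc : List Char) (out : PySem.Set String) (y : String),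
    y ∈ collectKids k acc out ↔ y ∈ out ∨
      ∃ c t w, (c, t) ∈ kidsEntries k ∧ trieHas w t ∧ y = String.ofList (acc ++ c :: w)
  | TrieKids.nil, acc, out, y => by simp [collectKids, kidsEntries]
  | TrieKids.cons c0 t0 rest, acc, out, y => by
      simp only [collectKids]
      rw [mem_collectKids rest acc _ y, mem_collect t0 (acc ++ [c0]) out y]
      simp only [kidsEntries, List.mem_cons, Prod.mk.injEq]
      constructor
      · rintro ((h | ⟨w, hw, -, hy⟩) | ⟨c, t', w, hmem, hw, hy⟩)
        · exact Or.inl h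
        · exact Or.inr ⟨c0, t0, w, Or.inl ⟨rfl, rfl⟩, hw, by simpa [List.append_assoc] using hy⟩
        · exact Or.inr ⟨c, t', w, Or.inr hmem, hw, hy⟩
      · rintro (h | ⟨c, t', w, hmem, hw, hy⟩)
        · exact Or.inl (Or.inl h)
        · rcases hmem with ⟨hc, ht⟩ | hmem
          · refine Or.inl (Or.inr ⟨w, ht ▸ hw, by simp, ?_⟩)
            rw [hy, hc, List.append_cons]
          · exact Or.inr ⟨c, t', w, hmem, hw, hy⟩
end

theorem mem_dangWalk : ∀ (rem : List Char) (t : Trie) (out : PySem.Set String) (y : String),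
    trieWF t →
    (y ∈ dangWalk t rem out ↔ y ∈ out ∨
      ∃ w, trieHas w t ∧ w ≠ rem ∧
        ((w <+: rem ∧ y = String.ofList (rem.drop w.length)) ∨
         (rem <+: w ∧ y = String.ofList (w.drop rem.length))))
  | [], t, out, y => fun _ => by
      simp only [dangWalk]
      rw [mem_collect t [] out y]
      simp only [List.nil_append]
      constructor
      · rintro (h | ⟨w, hw, hne, hy⟩)
        · exact Or.inl h
        · exact Or.inr ⟨w, hw, hne, Or.inr ⟨List.nil_prefix, by simpa using hy⟩⟩
      · rintro (h | ⟨w, hw, hne, (⟨hp, -⟩ | ⟨-, hy⟩)⟩)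
        · exact Or.inl h
        · exact absurd (List.prefix_nil.mp hp) hne
        · exact Or.inr ⟨w, hw, hne, by simpa using hy⟩
  | c :: rest, Trie.node b kids, out, y => fun hwf => by
      obtain ⟨hnd, hkw⟩ : (kidsChars kids).Nodup ∧ kidsWF kids := by simpa [trieWF] using hwf
      have hsplit : (∃ w, trieHas w (Trie.node b kids) ∧ w ≠ c :: rest ∧
          ((w <+: c :: rest ∧ y = String.ofList ((c :: rest).drop w.length)) ∨
           (c :: rest <+: w ∧ y = String.ofList (w.drop (c :: rest).length)))) ↔
          ((b = true ∧ y = String.ofList (c :: rest)) ∨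
           (∃ t', kidsFind kids c = some t' ∧ ∃ w', trieHas w' t' ∧ w' ≠ rest ∧
             ((w' <+: rest ∧ y = String.ofList (rest.drop w'.length)) ∨
              (rest <+: w' ∧ y = String.ofList (w'.drop rest.length))))) := by
        constructor
        · rintro ⟨w, hw, hne, hcond⟩
          cases w with
          | nil =>
            rcases hcond with ⟨-, hy⟩ | ⟨hp, -⟩
            · exact Or.inl ⟨(trieHas_nil b kids).mp hw, by simpa using hy⟩
            · exact absurd (List.prefix_nil.mp hp) (List.cons_ne_nil c rest)
          | cons c' w' =>
            obtain ⟨t', hmem, hhas⟩ :=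
              (entry_ex_iff (kidsEntries kids) c' (trieHas w')).mp ((trieHas_cons _ _ _ _).mp hw)
            rcases hcond with ⟨hp, hy⟩ | ⟨hp, hy⟩
            · obtain ⟨he, hp'⟩ := List.cons_prefix_cons.mp hp
              refine Or.inr ⟨t', (kidsFind_iff_entry c t' kids hnd).mpr (he ▸ hmem), w', hhas,
                fun e => hne (by rw [he, e]), Or.inl ⟨hp', by simpa using hy⟩⟩
            · obtain ⟨he, hp'⟩ := List.cons_prefix_cons.mp hp
              refine Or.inr ⟨t', (kidsFind_iff_entry c t' kids hnd).mpr (he ▸ hmem), w', hhas,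
                fun e => hne (by rw [he, e]), Or.inr ⟨hp', by simpa using hy⟩⟩
        · rintro (⟨hb, hy⟩ | ⟨t', hf, w', hhas, hne, hcond⟩)
          · refine ⟨[], (trieHas_nil b kids).mpr hb, ?_, Or.inl ⟨List.nil_prefix, by simpa using hy⟩⟩
            exact fun e => (List.cons_ne_nil c rest) e.symm
          · have hmem := (kidsFind_iff_entry c t' kids hnd).mp hf
            refine ⟨c :: w', (trieHas_cons _ _ _ _).mpr ((entry_ex_iff _ _ _).mpr ⟨t', hmem, hhas⟩), ?_, ?_⟩
            · intro e; injection e with _ h2; exact hne h2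
            · rcases hcond with ⟨hp, hy⟩ | ⟨hp, hy⟩
              · exact Or.inl ⟨List.cons_prefix_cons.mpr ⟨rfl, hp⟩, by simpa using hy⟩
              · exact Or.inr ⟨List.cons_prefix_cons.mpr ⟨rfl, hp⟩, by simpa using hy⟩
      simp only [dangWalk]
      cases hf : kidsFind kids c with
      | none =>
        rw [hf] at hsplit
        rw [mem_add_if, hsplit]
        constructor
        · rintro (h | ⟨hb, hy⟩)
          · exact Or.inl h
          · exact Or.inr (Or.inl ⟨hb, hy⟩)
        · rintro (h | (⟨hb, hy⟩ | ⟨t', hf', -⟩))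
          · exact Or.inl h
          · exact Or.inr ⟨hb, hy⟩
          · exact absurd hf' (by simp)
      | some t' =>
        rw [hf] at hsplit
        have hwft' : trieWF t' :=
          kidsWF_entry c t' kids hkw ((kidsFind_iff_entry c t' kids hnd).mp hf)
        rw [mem_dangWalk rest t' _ y hwft', mem_add_if, hsplit]
        constructor
        · rintro ((h | ⟨hb, hy⟩) | ⟨w', h1, h2, h3⟩)
          · exact Or.inl h
          · exact Or.inr (Or.inl ⟨hb, hy⟩)
          · exact Or.inr (Or.inr ⟨t', rfl, w', h1, h2, h3⟩)
        · rintro (h | (⟨hb, hy⟩ | ⟨t'', ht'', w', h1, h2, h3⟩))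
          · exact Or.inl (Or.inl h)
          · exact Or.inl (Or.inr ⟨hb, hy⟩)
          · exact Or.inr ⟨w', (Option.some.inj ht'').symm ▸ h1, h2, h3⟩

theorem slice_from_len (s c : String) :
    PySem.Str.slice s (some (PySem.Str.len c)) none = String.ofList (s.toList.drop c.toList.length) := by
  apply String.toList_inj.mp
  rw [PySem.Str.toList_slice, PySem.Chars.slice_eq_listSlice,
      PySem.List.slice_from _ (by rw [PySem.Str.len_eq]; positivity)]
  rw [PySem.Str.len_eq]
  simp

theorem mem_esUDalt_next (code S : PySem.Set String) (y : String) :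
    y ∈ esUDalt_next (trieOf code) S ↔ ∃ i ∈ S, Phi code i y := by
  unfold esUDalt_next
  rw [mem_foldl_emit (fun i y => Phi code i y) _ ?_ S PySem.Set.empty y]
  · simp [PySem.Set.empty]
  · intro out i y
    rw [mem_dangWalk i.toList (trieOf code) out y (trieWF_trieOf code)]
    have hiff : (∃ w, trieHas w (trieOf code) ∧ w ≠ i.toList ∧
        ((w <+: i.toList ∧ y = String.ofList (i.toList.drop w.length)) ∨
         (i.toList <+: w ∧ y = String.ofList (w.drop i.toList.length)))) ↔ Phi code i y := by
      constructor
      · rintro ⟨w, hw, hne, hcond⟩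
        obtain ⟨s, hs, rfl⟩ := (trieHas_trieOf code w).mp hw
        refine ⟨s, hs, fun e => hne (by rw [e]), ?_⟩
        rcases hcond with ⟨hp, hy⟩ | ⟨hp, hy⟩
        · exact Or.inr ⟨hp, by rw [hy, slice_from_len]⟩
        · exact Or.inl ⟨hp, by rw [hy, slice_from_len]⟩
      · rintro ⟨s, hs, hne, hcond⟩
        refine ⟨s.toList, (trieHas_trieOf code _).mpr ⟨s, hs, rfl⟩,
          fun e => hne (String.toList_inj.mp e), ?_⟩
        rcases hcond with ⟨hp, hy⟩ | ⟨hp, hy⟩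
        · exact Or.inr ⟨hp, by rw [hy, slice_from_len]⟩
        · exact Or.inl ⟨hp, by rw [hy, slice_from_len]⟩
    rw [hiff]

-- ===== driver equivalence =====

def SetEquiv (s t : PySem.Set String) : Prop := ∀ x, x ∈ s ↔ x ∈ t

theorem equal_iff_setEquiv (s t : PySem.Set String) :
    PySem.Set.equal s t = true ↔ SetEquiv s t := by
  unfold PySem.Set.equal SetEquiv
  rw [Bool.and_eq_true, PySem.Set.issubset_iff, PySem.Set.issubset_iff]
  constructor
  · rintro ⟨h1, h2⟩ x; exact ⟨fun h => h1 x h, fun h => h2 x h⟩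
  · intro h; exact ⟨fun x hx => (h x).mp hx, fun x hx => (h x).mpr hx⟩

theorem any_equal_congr {l l' : List (PySem.Set String)} {s t : PySem.Set String}
    (hl : List.Forall₂ SetEquiv l l') (hst : SetEquiv s t) :
    (l.any (fun u => PySem.Set.equal s u)) = (l'.any (fun u => PySem.Set.equal t u)) := by
  induction hl with
  | nil => rfl
  | cons hu _ ih =>
    simp only [List.any_cons, ih]
    congr 1
    rename_i u u' _ _
    rw [Bool.eq_iff_iff, equal_iff_setEquiv, equal_iff_setEquiv]
    constructor
    · intro h x; exact ((hst x).symm.trans (h x)).trans (hu x)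
    · intro h x; exact ((hst x).trans (h x)).trans (hu x).symm

theorem inter_isEmpty_iff (s t : PySem.Set String) :
    (PySem.Set.inter s t).isEmpty = true ↔ ∀ x ∈ s, x ∉ t := by
  unfold PySem.Set.inter
  rw [List.isEmpty_iff, List.filter_eq_nil_iff]
  simp

theorem step_equiv (code : PySem.Set String) {s t : PySem.Set String} (h : SetEquiv s t) :
    SetEquiv (esUD_fill s code) (esUDalt_next (trieOf code) t) := by
  intro x
  rw [mem_esUD_fill, mem_esUDalt_next]
  constructor
  · rintro ⟨i, hi, hphi⟩; exact ⟨i, (h i).mp hi, hphi⟩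
  · rintro ⟨i, hi, hphi⟩; exact ⟨i, (h i).mpr hi, hphi⟩

theorem loop_equiv (C1s : PySem.Set String) :
    ∀ (fuel : Nat) (lista history : List (PySem.Set String)) (s_aux S : PySem.Set String),
      List.Forall₂ SetEquiv lista history → SetEquiv s_aux S →
      esUD_loop C1s C1s fuel lista s_aux = esUDalt_loop C1s (trieOf C1s) fuel history S := by
  intro fuel
  induction fuel with
  | zero => intro lista history s_aux S hl hst; exact any_equal_congr hl hst
  | succ fuel ih =>
    intro lista history s_aux S hl hst
    have hmem := any_equal_congr hl hst
    have hdis : (PySem.Set.inter C1s s_aux).isEmpty = PySem.Set.isdisjoint C1s S := by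
      rw [Bool.eq_iff_iff, inter_isEmpty_iff, PySem.Set.isdisjoint_iff]
      constructor
      · intro h x hx hxS; exact h x hx ((hst x).mpr hxS)
      · intro h x hx hxs; exact h x hx ((hst x).mp hxs)
    simp only [esUD_loop, esUDalt_loop, hdis, hmem]
    cases hd : PySem.Set.isdisjoint C1s S with
    | false => simp
    | true =>
      cases hm : history.any (fun t => PySem.Set.equal S t) with
      | true => simp
      | false =>
        simp only [Bool.not_false, Bool.and_true, if_true, Bool.not_true, Bool.false_eq_true,
          if_false]
        exact ih _ _ _ _ (List.rel_append hl (List.Forall₂.cons hst List.Forall₂.nil))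
          (step_equiv C1s hst)

-- ===== VERDICT (by name: the statement is the Claim_ definition above) =====
theorem es_UD_spec : Claim_equal_es_UD := by
  intro C1 _
  unfold Spec_es_UD es_UD es_UD_alt
  exact loop_equiv (PySem.Set.ofList C1) (pvFuel C1) _ _ _ _
    (List.Forall₂.cons (fun _ => Iff.rfl) List.Forall₂.nil)
    (step_equiv _ (fun _ => Iff.rfl))
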